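-- pv_equiv track=rewrite | github.com/cookie-god/algorithm | programmers/level2/롤케이크 자르기.py | solution
-- ===== SOURCE A (Python) =====
-- from collections import Counter
--
-- def solution(topping):
--     answer = 0
--     counter = Counter(topping)  # 철수가 가진 롤케이크 개수 체크
--     arr = set()  # 동생의 롤케이크 종류
--
--     for t in topping:
--         counter[t] -= 1  # 철수가 가진 롤케이크 종류 찾아 감소
--         arr.add(t)  # 동생의 롤케이크 종류 증가
--
--         if counter[t] == 0:  # 철수가 가진 롤케이크 종류가 아예 없다면 제거
--             counter.pop(t)
--
--         if len(counter) == len(arr):  # 두개의 크기가 같다면 정답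
--             answer += 1
--
--     return answer
-- ===== SOURCE B (Python) =====
-- def solution(topping):
--     # suffix pass: suf[i] = number of distinct toppings in topping[i:]
--     suf = [0]
--     seen = set()
--     for t in reversed(topping):
--         seen.add(t)
--         suf.append(len(seen))
--     suf.reverse()
--     # prefix pass: compare prefix-distinct count against the precomputed suffix table
--     answer = 0
--     left = set()
--     for t, s in zip(topping, suf[1:]):
--         left.add(t)
--         if len(left) == s:
--             answer += 1
--     return answer
-- ===== Notes on version B (the rewrite author's own statement) =====
-- stated objective: alternative
-- what changed: Replaces A's single pass that decrements a Counter of the whole list (popping exhausted keys) with two set passes: a right-to-left scan precomputing a suffix-distinct table, then a left-to-right scan comparing the growing prefix set's size against that table.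
import Mathlib
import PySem

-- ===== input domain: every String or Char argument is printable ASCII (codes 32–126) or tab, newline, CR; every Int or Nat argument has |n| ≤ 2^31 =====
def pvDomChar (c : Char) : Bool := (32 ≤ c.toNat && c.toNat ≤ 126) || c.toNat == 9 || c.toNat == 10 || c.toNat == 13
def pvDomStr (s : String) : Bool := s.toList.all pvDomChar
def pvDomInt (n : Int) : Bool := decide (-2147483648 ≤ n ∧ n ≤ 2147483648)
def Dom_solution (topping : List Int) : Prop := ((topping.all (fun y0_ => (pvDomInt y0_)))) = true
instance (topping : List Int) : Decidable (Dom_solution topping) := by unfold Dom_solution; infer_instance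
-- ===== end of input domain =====

-- B replaces A's single decrementing-Counter pass with a suffix-distinct table plus a prefix-set pass (alternative decomposition, same O(n) cost).

-- ===== PORT A =====
-- loop body of A, named so the proofs can speak about it
def stepA (st : Int × PySem.Dict Int Int × PySem.Set Int) (t : Int) :
    Int × PySem.Dict Int Int × PySem.Set Int :=
  let counter := st.2.1.modify t 0 (· - 1)        -- counter[t] -= 1
  let arr := PySem.Set.add st.2.2 t               -- arr.add(t)
  let counter := if counter.getD t 0 = 0 then counter.erase t else counter  -- pop at 0
  let answer := if (counter.size : Int) = PySem.Set.len arr then st.1 + 1 else st.1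
  (answer, counter, arr)

def solution (topping : List Int) : Int :=
  (topping.foldl stepA (0, PySem.Dict.counter topping, PySem.Set.empty)).1

-- ===== PORT B =====
-- body of B's right-to-left pass: seen.add(t); suf.append(len(seen))
def stepB1 (p : PySem.Set Int × List Int) (t : Int) : PySem.Set Int × List Int :=
  let seen := PySem.Set.add p.1 t
  (seen, p.2 ++ [PySem.Set.len seen])

-- body of B's left-to-right pass: left.add(t); if len(left) == s: answer += 1
def stepB2 (q : Int × PySem.Set Int) (p : Int × Int) : Int × PySem.Set Int :=
  let left := PySem.Set.add q.2 p.1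
  (if PySem.Set.len left = p.2 then q.1 + 1 else q.1, left)

def solution_alt (topping : List Int) : Int :=
  let st := topping.reverse.foldl stepB1 (PySem.Set.empty, [(0 : Int)])
  let suf := st.2.reverse
  -- suf[1:] is suf.drop 1 (exact: a nonnegative unit-step slice from 1)
  ((topping.zip (suf.drop 1)).foldl stepB2 (0, PySem.Set.empty)).1

-- ===== PRECONDITION & SPEC =====
def Spec_solution (topping : List Int) (out : Int) : Prop := out = solution_alt topping
instance (topping : List Int) (out : Int) : Decidable (Spec_solution topping out) := by unfold Spec_solution; infer_instance

-- ===== CLAIM (what is proved, stated in full; the proofs are below) =====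
def Claim_equal_solution : Prop := ∀ (topping : List Int), Dom_solution topping → Spec_solution topping (solution topping)

-- ===== LEMMAS AND PROOFS =====

-- number of distinct elements of a list
def dc (xs : List Int) : Nat := (PySem.Set.ofList xs).length

-- the count both programs compute: indices i with distinct(prefix through i) = distinct(suffix after i)
def F : List Int → List Int → Int
  | _, [] => 0
  | pre, t :: rs => (if dc (pre ++ [t]) = dc rs then 1 else 0) + F (pre ++ [t]) rs

lemma ofList_append_singleton (pre : List Int) (t : Int) :
    PySem.Set.ofList (pre ++ [t]) = PySem.Set.add (PySem.Set.ofList pre) t := by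
  simp [PySem.Set.ofList_eq_foldl, List.foldl_append]

lemma dc_eq_of_mem_iff (xs ys : List Int) (h : ∀ x, x ∈ xs ↔ x ∈ ys) : dc xs = dc ys := by
  have hp : (PySem.Set.ofList xs).Perm (PySem.Set.ofList ys) := by
    refine (List.perm_ext_iff_of_nodup (PySem.Set.nodup_ofList xs) (PySem.Set.nodup_ofList ys)).2 ?_
    intro a; rw [PySem.Set.mem_ofList, PySem.Set.mem_ofList]; exact h a
  exact hp.length_eq

lemma size_eq_keys_length (d : PySem.Dict Int Int) : d.size = d.keys.length := by
  simp [PySem.Dict.size, PySem.Dict.keys]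

lemma length_keys_eq_dc (d : PySem.Dict Int Int) (rs : List Int)
    (hnd : d.keys.Nodup) (hmem : ∀ k, k ∈ d.keys ↔ k ∈ rs) : d.keys.length = dc rs := by
  have hp : d.keys.Perm (PySem.Set.ofList rs) := by
    refine (List.perm_ext_iff_of_nodup hnd (PySem.Set.nodup_ofList rs)).2 ?_
    intro a; rw [PySem.Set.mem_ofList]; exact hmem a
  exact hp.length_eq

lemma get?_erase (d : PySem.Dict Int Int) (t k : Int) :
    (d.erase t).get? k = if k = t then none else d.get? k := by
  obtain ⟨items⟩ := d
  induction items with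
  | nil => simp [PySem.Dict.erase, PySem.Dict.get?]
  | cons p ps ih =>
    by_cases hpt : p.1 = t <;> by_cases hpk : p.1 = k <;>
      simp_all [PySem.Dict.erase, PySem.Dict.get?]

lemma getD_erase (d : PySem.Dict Int Int) (t k : Int) :
    (d.erase t).getD k 0 = if k = t then 0 else d.getD k 0 := by
  simp [PySem.Dict.getD, get?_erase]; split <;> simp

lemma keys_erase (d : PySem.Dict Int Int) (t : Int) :
    (d.erase t).keys = d.keys.filter (fun k => !(k == t)) := by
  obtain ⟨items⟩ := d
  induction items with
  | nil => simp [PySem.Dict.erase, PySem.Dict.keys]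
  | cons p ps ih => by_cases hpt : p.1 = t <;> simp_all [PySem.Dict.erase, PySem.Dict.keys]

lemma loopA (rest : List Int) : ∀ (pre : List Int) (acc : Int) (d : PySem.Dict Int Int),
    d.keys.Nodup → (∀ k, d.getD k 0 = (rest.count k : Int)) → (∀ k, k ∈ d.keys ↔ k ∈ rest) →
    (rest.foldl stepA (acc, d, PySem.Set.ofList pre)).1 = acc + F pre rest := by
  induction rest with
  | nil => intro pre acc d _ _ _; simp [F]
  | cons t rs ih =>
    intro pre acc d hnd hval hmem
    have hvt : d.getD t 0 = ((rs.count t : Nat) : Int) + 1 := by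
      have := hval t; simpa [List.count_cons] using this
    have hd1 : ∀ k, (d.modify t 0 (· - 1)).getD k 0 = if k = t then (rs.count t : Int) else d.getD k 0 := by
      intro k; rw [PySem.Dict.getD_modify]; split <;> simp_all
    have hkeys1 : (d.modify t 0 (· - 1)).keys = d.keys := by
      rw [PySem.Dict.keys_modify, PySem.Dict.keys_insert_of_contains]
      rw [PySem.Dict.contains_iff_mem_keys]
      exact (hmem t).2 (by simp)
    by_cases hts : t ∈ rs
    · -- count of t in rs positive: no pop
      have hcond : ¬ ((d.modify t 0 (· - 1)).getD t 0 = 0) := by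
        rw [hd1]; simp
        have : 0 < rs.count t := List.count_pos_iff.2 hts
        omega
      have hstep : stepA (acc, d, PySem.Set.ofList pre) t =
          (acc + (if dc (pre ++ [t]) = dc rs then 1 else 0), d.modify t 0 (· - 1),
           PySem.Set.ofList (pre ++ [t])) := by
        have hsz : ((d.modify t 0 (· - 1)).size : Int) = (dc rs : Int) := by
          rw [size_eq_keys_length, hkeys1]
          norm_cast
          refine length_keys_eq_dc d rs hnd ?_
          intro k
          by_cases hk : k = t
          · rw [hk, hmem t]; simp [hts]
          · rw [hmem k]; simp [hk]
        have hlen : PySem.Set.len (PySem.Set.ofList (pre ++ [t])) = (dc (pre ++ [t]) : Int) := by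
          simp [PySem.Set.len, dc]
        simp only [stepA, ← ofList_append_singleton, if_neg hcond]
        rw [hsz, hlen]
        rcases eq_or_ne (dc (pre ++ [t])) (dc rs) with h | h
        · simp [h]
        · have h2 : ¬ (((dc rs : Nat) : Int) = ((dc (pre ++ [t]) : Nat) : Int)) := by omega
          simp [h, h2]
      rw [List.foldl_cons, hstep,
        ih (pre ++ [t]) _ _ (by rw [hkeys1]; exact hnd)
          (by intro k; rw [hd1]; split
              · subst ‹k = t›; rfl
              · rw [hval k]
                have : ¬ t = k := fun h => ‹¬ k = t› h.symm
                simp [this])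
          (by intro k; rw [hkeys1, hmem k]
              by_cases hk : k = t
              · subst hk; simp [hts]
              · simp [hk]), F]
      ring
    · -- t exhausted: popped
      have hcond : (d.modify t 0 (· - 1)).getD t 0 = 0 := by
        rw [hd1]; simp [List.count_eq_zero_of_not_mem hts]
      set d2 := (d.modify t 0 (· - 1)).erase t with hd2
      have hk2 : d2.keys = d.keys.filter (fun k => !(k == t)) := by
        rw [hd2, keys_erase, hkeys1]
      have hnd2 : d2.keys.Nodup := by rw [hk2]; exact hnd.filter _
      have hmem2 : ∀ k, k ∈ d2.keys ↔ k ∈ rs := by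
        intro k; rw [hk2, List.mem_filter]
        by_cases hk : k = t
        · subst hk; simp [hts]
        · simp [hk, hmem k]
      have hval2 : ∀ k, d2.getD k 0 = (rs.count k : Int) := by
        intro k; rw [hd2, getD_erase, hd1]
        by_cases hk : k = t
        · simp [hk, List.count_eq_zero_of_not_mem hts]
        · have : ¬ t = k := fun h => hk h.symm
          simp [hk, hval k, this]
      have hstep : stepA (acc, d, PySem.Set.ofList pre) t =
          (acc + (if dc (pre ++ [t]) = dc rs then 1 else 0), d2,
           PySem.Set.ofList (pre ++ [t])) := by
        have hsz : (((d.modify t 0 (· - 1)).erase t).size : Int) = (dc rs : Int) := by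
          rw [size_eq_keys_length]
          norm_cast
          exact length_keys_eq_dc _ rs hnd2 hmem2
        have hlen : PySem.Set.len (PySem.Set.ofList (pre ++ [t])) = (dc (pre ++ [t]) : Int) := by
          simp [PySem.Set.len, dc]
        simp only [stepA, ← ofList_append_singleton, hcond, if_pos, hd2]
        rw [hsz, hlen]
        rcases eq_or_ne (dc (pre ++ [t])) (dc rs) with h | h
        · simp [h]
        · have h2 : ¬ (((dc rs : Nat) : Int) = ((dc (pre ++ [t]) : Nat) : Int)) := by omega
          simp [h, h2]
      rw [List.foldl_cons, hstep, ih (pre ++ [t]) _ _ hnd2 hval2 hmem2, F]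
      ring

-- ---- B side ----

-- the running lengths appended by B's first pass
def R : PySem.Set Int → List Int → List Int
  | _, [] => []
  | s, y :: ys => PySem.Set.len (PySem.Set.add s y) :: R (PySem.Set.add s y) ys

lemma fold1_eq (ys : List Int) : ∀ (s : PySem.Set Int) (l : List Int),
    ys.foldl stepB1 (s, l) = (PySem.Set.update s ys, l ++ R s ys) := by
  induction ys with
  | nil => intro s l; simp [PySem.Set.update, R]
  | cons y ys ih =>
    intro s l
    rw [List.foldl_cons]
    show (ys.foldl stepB1 (PySem.Set.add s y, l ++ [PySem.Set.len (PySem.Set.add s y)])) = _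
    rw [ih]
    simp [PySem.Set.update, R]

lemma R_append (ys : List Int) : ∀ (s : PySem.Set Int) (t : Int),
    R s (ys ++ [t]) = R s ys ++ [PySem.Set.len (PySem.Set.add (PySem.Set.update s ys) t)] := by
  induction ys with
  | nil => intro s t; simp [R, PySem.Set.update]
  | cons y ys ih => intro s t; simp [R, ih, PySem.Set.update]

-- suffix-distinct table: sufL xs = [distinct(xs[0:]), distinct(xs[1:]), …, 0]
def sufL : List Int → List Int
  | [] => [(0 : Int)]
  | t :: rs => (dc (t :: rs) : Int) :: sufL rs

lemma suf_eq (xs : List Int) :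
    ((0 : Int) :: R PySem.Set.empty xs.reverse).reverse = sufL xs := by
  induction xs with
  | nil => simp [R, sufL]
  | cons t rs ih =>
    have hup : PySem.Set.update PySem.Set.empty rs.reverse = PySem.Set.ofList rs.reverse := by
      simp [PySem.Set.update, PySem.Set.ofList_eq_foldl, PySem.Set.empty]
    have hlen : PySem.Set.len (PySem.Set.add (PySem.Set.ofList rs.reverse) t) = (dc (t :: rs) : Int) := by
      rw [← ofList_append_singleton]
      simp only [PySem.Set.len, dc]
      norm_cast
      refine dc_eq_of_mem_iff _ _ ?_
      intro x; simp [List.mem_append, or_comm]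
    have h1 : (t :: rs).reverse = rs.reverse ++ [t] := by simp
    rw [h1, R_append, hup, hlen, sufL, ← ih]
    simp

-- B's zipped stream, pair i = (topping[i], distinct(topping[i+1:]))
def T : List Int → List (Int × Int)
  | [] => []
  | t :: rs => (t, (dc rs : Int)) :: T rs

lemma sufL_head_tail (rs : List Int) : sufL rs = (dc rs : Int) :: (sufL rs).drop 1 := by
  cases rs <;> simp [sufL, dc, PySem.Set.ofList]

lemma zip_sufL (xs : List Int) : xs.zip ((sufL xs).drop 1) = T xs := by
  induction xs with
  | nil => simp [T]
  | cons t rs ih =>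
    show (t :: rs).zip (sufL rs) = T (t :: rs)
    rw [sufL_head_tail rs, List.zip_cons_cons, T, ← ih]

lemma loopB (rest : List Int) : ∀ (pre : List Int) (acc : Int),
    ((T rest).foldl stepB2 (acc, PySem.Set.ofList pre)).1 = acc + F pre rest := by
  induction rest with
  | nil => intro pre acc; simp [T, F]
  | cons t rs ih =>
    intro pre acc
    have hstep : stepB2 (acc, PySem.Set.ofList pre) (t, (dc rs : Int)) =
        (acc + (if dc (pre ++ [t]) = dc rs then 1 else 0), PySem.Set.ofList (pre ++ [t])) := by
      simp only [stepB2, ofList_append_singleton, PySem.Set.len]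
      rw [← ofList_append_singleton]
      by_cases h : dc (pre ++ [t]) = dc rs
      · simp [dc] at h; simp [h, dc]
      · have : ¬ (((PySem.Set.ofList (pre ++ [t])).length : Int) = (dc rs : Int)) := by
          simpa [dc] using fun hh => h (by exact_mod_cast hh)
        simp only [this, if_false]
        simp [dc] at h
        simp [h, dc]
    rw [T, List.foldl_cons, hstep, ih (pre ++ [t]), F]
    ring

lemma solution_eq_F (topping : List Int) : solution topping = F [] topping := by
  have h := loopA topping [] 0 (PySem.Dict.counter topping)
    (PySem.Dict.nodup_keys_counter topping)
    (fun k => by rw [PySem.Dict.getD_counter])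
    (fun k => by rw [PySem.Dict.keys_counter, PySem.Set.mem_ofList])
  simpa [solution, PySem.Set.ofList] using h

lemma solution_alt_eq_F (topping : List Int) : solution_alt topping = F [] topping := by
  unfold solution_alt
  rw [fold1_eq]
  show ((topping.zip (((0 : Int) :: R PySem.Set.empty topping.reverse).reverse.drop 1)).foldl
    stepB2 (0, PySem.Set.empty)).1 = _
  rw [suf_eq, zip_sufL]
  have h := loopB topping [] 0
  simpa [PySem.Set.ofList] using h

-- ===== VERDICT (by name: the statement is the Claim_ definition above) =====
theorem solution_spec : Claim_equal_solution := by
  intro topping _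
  show solution topping = solution_alt topping
  rw [solution_eq_F, solution_alt_eq_F]
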